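-- pv_equiv track=rewrite | github.com/June2December/Algorithm | graph/B_DFS/filling_puzzle.py | compare_puzzle
-- ===== SOURCE A (Python) =====
-- def affine(coor:list):
--     x_min = 1e10
--     y_min = 1e10
--     for x, y in coor:
--         if x < x_min:
--             x_min = x
--         if y < y_min:
--             y_min = y
--     return sorted([(x-x_min, y-y_min) for x, y in coor])
--
-- def compare_puzzle(puzzles, holes):
--     def affine_rot(shape):
--         rotations = []
--         cur = shape
--         for _ in range(4):
--             rotations.append(cur)
--             # 90도 회전: (x, y) --> (-y, x)
--             # rot 행렬 : [0, -1] [1, 0] 되니까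
--             cur = [(-y, x) for x, y in cur]
--             cur = affine(cur)
--         return rotations
--
--     count = 0
--     # 확인한 퍼즐은 다시 안해도 되지
--     visited = [False] * len(puzzles)
--     # sorted 했으니까 굳이 안해도 될듯???
--     for hole in holes:
--         for idx, puzzle in enumerate(puzzles):
--             if visited[idx]:
--                 continue
--             if len(puzzle) != len(hole):
--                 continue
--             rot_puzzle = affine_rot(puzzle)
--             if hole in rot_puzzle:
--                 visited[idx] = True
--                 count += len(hole)
--                 break
--     return count
-- ===== SOURCE B (Python) =====
-- def _norm(coor):
--     # translate so mins are 0, then sort (canonical placement of a shape)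
--     coor = list(coor)
--     if not coor:
--         return []
--     xm = min(x for x, _ in coor)
--     ym = min(y for _, y in coor)
--     return sorted((x - xm, y - ym) for x, y in coor)
--
--
-- def compare_puzzle(puzzles, holes):
--     # Index every form a hole could equal (the raw puzzle, plus its three
--     # normalised rotations) into one dict, so each hole is a single lookup
--     # instead of a scan over all puzzles.
--     index = {}
--     for i, p in enumerate(puzzles):
--         forms = {tuple(p)}
--         cur = p
--         for _ in range(3):
--             cur = _norm((-y, x) for x, y in cur)
--             forms.add(tuple(cur))
--         for f in forms:
--             index.setdefault(f, []).append(i)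
--
--     visited = [False] * len(puzzles)
--     count = 0
--     for hole in holes:
--         for i in index.get(tuple(hole), ()):
--             if not visited[i]:
--                 visited[i] = True
--                 count += len(hole)
--                 break
--     return count
-- ===== Notes on version B (the rewrite author's own statement) =====
-- stated objective: faster
-- what changed: Instead of recomputing all four rotation forms of every remaining puzzle for every hole (and scanning puzzles per hole), B computes each puzzle's forms once, hashes every form into a dict mapping form -> puzzle indices, and resolves each hole by a single dict lookup plus a lazy skip over already-used indices.
import Mathlib
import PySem

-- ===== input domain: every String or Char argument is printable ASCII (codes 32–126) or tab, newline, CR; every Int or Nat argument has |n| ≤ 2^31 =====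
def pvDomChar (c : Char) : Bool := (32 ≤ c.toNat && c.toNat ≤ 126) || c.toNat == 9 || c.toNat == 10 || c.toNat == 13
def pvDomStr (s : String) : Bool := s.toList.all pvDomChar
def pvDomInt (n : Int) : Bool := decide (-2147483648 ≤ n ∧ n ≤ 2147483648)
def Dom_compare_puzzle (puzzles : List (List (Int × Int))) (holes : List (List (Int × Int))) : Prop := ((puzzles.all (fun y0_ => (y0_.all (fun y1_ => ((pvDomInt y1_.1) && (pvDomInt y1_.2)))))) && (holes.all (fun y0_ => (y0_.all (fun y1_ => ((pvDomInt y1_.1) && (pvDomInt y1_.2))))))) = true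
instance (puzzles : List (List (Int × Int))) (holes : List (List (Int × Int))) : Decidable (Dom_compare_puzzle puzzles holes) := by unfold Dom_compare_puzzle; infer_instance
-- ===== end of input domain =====

-- B replaces A's per-hole rescan of all puzzles (rebuilding each puzzle's rotation forms for
-- every hole) by a precomputed dict from each form to the puzzle indices carrying it; each hole
-- becomes one lookup. Faster: O(H*P*k log k) -> O((H+P)*k log k).


-- ===== PORT A =====
-- affine: running mins (Python inits them to the float 1e10; exact as the integer 10^10 on the
-- declared domain |n| ≤ 2^31, where the comparison and the final subtraction only ever see ints),
-- then sorted() of the translated tuples (Python tuple order = sorted2 on fst, snd).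
def pvAffine (coor : List (Int × Int)) : List (Int × Int) :=
  let mins := coor.foldl
    (fun (m : Int × Int) p =>
      ((if p.1 < m.1 then p.1 else m.1), (if p.2 < m.2 then p.2 else m.2)))
    (10000000000, 10000000000)
  PySem.List.sorted2 (coor.map fun p => (p.1 - mins.1, p.2 - mins.2)) Prod.fst Prod.snd

-- affine_rot: four iterations appending `cur`, then cur = affine([(-y, x) ...])
def pvAffineRot (shape : List (Int × Int)) : List (List (Int × Int)) :=
  ((List.range 4).foldl
    (fun (st : List (List (Int × Int)) × List (Int × Int)) _ =>
      (st.1 ++ [st.2], pvAffine (st.2.map fun p => (-p.2, p.1))))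
    ([], shape)).1

-- inner `for idx, puzzle in enumerate(puzzles)` loop with its continues and break
def pvFindA (hole : List (Int × Int)) (i : Nat) (ps : List (List (Int × Int)))
    (visited : List Bool) (count : Int) : List Bool × Int :=
  match ps with
  | [] => (visited, count)
  | p :: rest =>
    if visited.getD i false then pvFindA hole (i + 1) rest visited count
    else if p.length ≠ hole.length then pvFindA hole (i + 1) rest visited count
    else if hole ∈ pvAffineRot p then (visited.set i true, count + (hole.length : Int))
    else pvFindA hole (i + 1) rest visited count

def compare_puzzle (puzzles : List (List (Int × Int))) (holes : List (List (Int × Int))) : Int :=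
  (holes.foldl (fun st hole => pvFindA hole 0 puzzles st.1 st.2)
    (List.replicate puzzles.length false, 0)).2

-- ===== PORT B =====
-- _norm: empty guard, min of each coordinate, sorted translated tuples
def pvNorm (coor : List (Int × Int)) : List (Int × Int) :=
  if coor = [] then []
  else
    let xm := (PySem.List.min? (coor.map Prod.fst) (fun v => v)).getD 0  -- nonempty: min() is exact
    let ym := (PySem.List.min? (coor.map Prod.snd) (fun v => v)).getD 0
    PySem.List.sorted2 (coor.map fun p => (p.1 - xm, p.2 - ym)) Prod.fst Prod.snd

-- forms = {tuple(p)}; three times: cur = _norm(rotated cur); forms.add(cur)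
def pvForms (p : List (Int × Int)) : PySem.Set (List (Int × Int)) :=
  ((List.range 3).foldl
    (fun (st : PySem.Set (List (Int × Int)) × List (Int × Int)) _ =>
      let nxt := pvNorm (st.2.map fun q => (-q.2, q.1))
      (PySem.Set.add st.1 nxt, nxt))
    (PySem.Set.ofList [p], p)).1

-- index.setdefault(f, []).append(i)  =  d[f] = d.get(f, []) + [i]  =  Dict.modify f [] (· ++ [i])
def pvIndex (puzzles : List (List (Int × Int))) : PySem.Dict (List (Int × Int)) (List Nat) :=
  puzzles.zipIdx.foldl
    (fun d pi => (pvForms pi.1).foldl (fun d f => d.modify f [] (· ++ [pi.2])) d)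
    PySem.Dict.empty

-- `for i in index.get(tuple(hole), ()): if not visited[i]: mark; count += len(hole); break`
def pvScan (cands : List Nat) (visited : List Bool) (count : Int) (hlen : Nat) : List Bool × Int :=
  match cands with
  | [] => (visited, count)
  | i :: rest =>
    if visited.getD i false then pvScan rest visited count hlen
    else (visited.set i true, count + (hlen : Int))

def compare_puzzle_alt (puzzles : List (List (Int × Int))) (holes : List (List (Int × Int))) : Int :=
  let index := pvIndex puzzles
  (holes.foldl (fun st hole => pvScan (index.getD hole []) st.1 st.2 hole.length)
    (List.replicate puzzles.length false, 0)).2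

-- ===== PRECONDITION & SPEC =====
def Spec_compare_puzzle (puzzles : List (List (Int × Int))) (holes : List (List (Int × Int))) (out : Int) : Prop := out = compare_puzzle_alt puzzles holes
instance (puzzles : List (List (Int × Int))) (holes : List (List (Int × Int))) (out : Int) : Decidable (Spec_compare_puzzle puzzles holes out) := by unfold Spec_compare_puzzle; infer_instance

-- ===== CLAIM (what is proved, stated in full; the proofs are below) =====
def Claim_equal_compare_puzzle : Prop := ∀ (puzzles : List (List (Int × Int))) (holes : List (List (Int × Int))), Dom_compare_puzzle puzzles holes → Spec_compare_puzzle puzzles holes (compare_puzzle puzzles holes)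

-- ===== LEMMAS AND PROOFS =====

-- all coordinates of s lie in [-C, C]
def pvBnd (C : Int) (s : List (Int × Int)) : Prop :=
  ∀ q ∈ s, -C ≤ q.1 ∧ q.1 ≤ C ∧ -C ≤ q.2 ∧ q.2 ≤ C

theorem pv_foldl_min_init (xs : List Int) (I : Int) (hlt : ∀ v ∈ xs, v < I) (hne : xs ≠ []) :
    xs.foldl (fun m v => if v < m then v else m) I = (PySem.List.min? xs (fun v => v)).getD 0 := by
  have hf : (fun (m v : Int) => if v < m then v else m) = fun m v => min m v := by
    funext m v; simp [min_def]; split_ifs <;> omega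
  rw [hf]
  match xs, hne with
  | x :: t, _ =>
    rw [PySem.List.min?_id_cons]
    have : min I x = x := min_eq_right (le_of_lt (hlt x (by simp)))
    simp [List.foldl_cons, this]


theorem pv_affine_eq_norm (B : Int) (coor : List (Int × Int))
    (hB : B < 10000000000) (h : pvBnd B coor) : pvAffine coor = pvNorm coor := by
  by_cases hne : coor = []
  · subst hne; rfl
  · unfold pvAffine pvNorm
    rw [if_neg hne]
    rw [PySem.List.foldl_prod_mk (f := fun m (p : Int × Int) => if p.1 < m then p.1 else m)
        (g := fun m (p : Int × Int) => if p.2 < m then p.2 else m)]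
    have hx : coor.foldl (fun m (p : Int × Int) => if p.1 < m then p.1 else m) 10000000000
        = (PySem.List.min? (coor.map Prod.fst) (fun v => v)).getD 0 := by
      have e := List.foldl_map (f := (Prod.fst : Int × Int → Int))
        (g := fun m v => if v < m then v else m) (l := coor) (init := (10000000000 : Int))
      rw [← e]
      exact pv_foldl_min_init _ _ (by intro v hv; simp only [List.mem_map] at hv
                                      obtain ⟨a, ha, rfl⟩ := hv; have := h a ha; omega)
        (by simpa using hne)
    have hy : coor.foldl (fun m (p : Int × Int) => if p.2 < m then p.2 else m) 10000000000
        = (PySem.List.min? (coor.map Prod.snd) (fun v => v)).getD 0 := by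
      have e := List.foldl_map (f := (Prod.snd : Int × Int → Int))
        (g := fun m v => if v < m then v else m) (l := coor) (init := (10000000000 : Int))
      rw [← e]
      exact pv_foldl_min_init _ _ (by intro v hv; simp only [List.mem_map] at hv
                                      obtain ⟨a, ha, rfl⟩ := hv; have := h a ha; omega)
        (by simpa using hne)
    rw [hx, hy]


theorem pv_norm_bnd (B : Int) (coor : List (Int × Int)) (h : pvBnd B coor) :
    pvBnd (2 * B) (pvNorm coor) := by
  unfold pvNorm
  split_ifs with hne
  · intro q hq; simp at hq
  · intro q hq
    have hq' := (PySem.List.sorted2_perm _ _ _ _).mem_iff.mp hq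
    simp only [List.mem_map] at hq'
    obtain ⟨p, hp, rfl⟩ := hq'
    have hxm : (PySem.List.min? (coor.map Prod.fst) (fun v => v)).getD 0 ∈ coor.map Prod.fst := by
      cases hmin : PySem.List.min? (coor.map Prod.fst) (fun v => v) with
      | none => exact absurd (by simpa using (PySem.List.min?_eq_none_iff _ _).mp hmin) hne
      | some m => simpa using PySem.List.min?_mem hmin
    have hym : (PySem.List.min? (coor.map Prod.snd) (fun v => v)).getD 0 ∈ coor.map Prod.snd := by
      cases hmin : PySem.List.min? (coor.map Prod.snd) (fun v => v) with
      | none => exact absurd (by simpa using (PySem.List.min?_eq_none_iff _ _).mp hmin) hne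
      | some m => simpa using PySem.List.min?_mem hmin
    simp only [List.mem_map] at hxm hym
    obtain ⟨a, ha, hxeq⟩ := hxm
    obtain ⟨b, hb, hyeq⟩ := hym
    have h1 := h p hp
    have h2 := h a ha
    have h3 := h b hb
    simp only []
    rw [← hxeq, ← hyeq]
    refine ⟨by omega, by omega, by omega, by omega⟩


theorem pv_rot_bnd (B : Int) (coor : List (Int × Int)) (h : pvBnd B coor) :
    pvBnd B (coor.map fun q => (-q.2, q.1)) := by
  intro q hq
  simp only [List.mem_map] at hq
  obtain ⟨p, hp, rfl⟩ := hq
  have := h p hp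
  refine ⟨by omega, by omega, by omega, by omega⟩


theorem pv_norm_length (coor : List (Int × Int)) : (pvNorm coor).length = coor.length := by
  unfold pvNorm
  split_ifs with hne
  · simp [hne]
  · rw [(PySem.List.sorted2_perm _ _ _ _).length_eq, List.length_map]


theorem pv_affineRot_eval (p : List (Int × Int)) :
    pvAffineRot p = [p,
      pvAffine (p.map fun q => (-q.2, q.1)),
      pvAffine ((pvAffine (p.map fun q => (-q.2, q.1))).map fun q => (-q.2, q.1)),
      pvAffine ((pvAffine ((pvAffine (p.map fun q => (-q.2, q.1))).map fun q => (-q.2, q.1))).map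
        fun q => (-q.2, q.1))] := by
  simp [pvAffineRot, List.range_succ]


theorem pv_forms_eval (p : List (Int × Int)) :
    pvForms p = PySem.Set.add (PySem.Set.add (PySem.Set.add (PySem.Set.ofList [p])
      (pvNorm (p.map fun q => (-q.2, q.1))))
      (pvNorm ((pvNorm (p.map fun q => (-q.2, q.1))).map fun q => (-q.2, q.1))))
      (pvNorm ((pvNorm ((pvNorm (p.map fun q => (-q.2, q.1))).map fun q => (-q.2, q.1))).map
        fun q => (-q.2, q.1))) := by
  simp [pvForms, List.range_succ]


theorem pv_forms_nodup (p : List (Int × Int)) : (pvForms p).Nodup := by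
  rw [pv_forms_eval]
  exact PySem.Set.nodup_add _ _ (PySem.Set.nodup_add _ _ (PySem.Set.nodup_add _ _
    (PySem.Set.nodup_ofList _)))


-- the central per-puzzle equivalence: A's (length test + membership in the rotation list)
-- is exactly membership in B's form set, on the bounded domain
theorem pv_match_iff (p hole : List (Int × Int)) (hD : pvBnd 2147483648 p) :
    (p.length = hole.length ∧ hole ∈ pvAffineRot p) ↔ hole ∈ pvForms p := by
  have hb1 : pvBnd 2147483648 (p.map fun q => (-q.2, q.1)) := pv_rot_bnd _ _ hD
  have e1 : pvAffine (p.map fun q => (-q.2, q.1)) = pvNorm (p.map fun q => (-q.2, q.1)) :=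
    pv_affine_eq_norm 2147483648 _ (by norm_num) hb1
  have hn1 : pvBnd (2 * 2147483648) (pvNorm (p.map fun q => (-q.2, q.1))) := pv_norm_bnd _ _ hb1
  have hb2 := pv_rot_bnd _ _ hn1
  have e2 : pvAffine ((pvNorm (p.map fun q => (-q.2, q.1))).map fun q => (-q.2, q.1))
      = pvNorm ((pvNorm (p.map fun q => (-q.2, q.1))).map fun q => (-q.2, q.1)) :=
    pv_affine_eq_norm (2 * 2147483648) _ (by norm_num) hb2
  have hn2 := pv_norm_bnd _ _ hb2
  have hb3 := pv_rot_bnd _ _ hn2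
  have e3 : pvAffine ((pvNorm ((pvNorm (p.map fun q => (-q.2, q.1))).map fun q => (-q.2, q.1))).map
        fun q => (-q.2, q.1))
      = pvNorm ((pvNorm ((pvNorm (p.map fun q => (-q.2, q.1))).map fun q => (-q.2, q.1))).map
        fun q => (-q.2, q.1)) :=
    pv_affine_eq_norm (2 * (2 * 2147483648)) _ (by norm_num) hb3
  rw [pv_affineRot_eval, pv_forms_eval, e1, e2, e3]
  set n1 := pvNorm (p.map fun q => (-q.2, q.1)) with hn1d
  set n2 := pvNorm (n1.map fun q => (-q.2, q.1)) with hn2d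
  set n3 := pvNorm (n2.map fun q => (-q.2, q.1)) with hn3d
  have l1 : n1.length = p.length := by rw [hn1d, pv_norm_length, List.length_map]
  have l2 : n2.length = p.length := by rw [hn2d, pv_norm_length, List.length_map, l1]
  have l3 : n3.length = p.length := by rw [hn3d, pv_norm_length, List.length_map, l2]
  simp only [List.mem_cons, List.not_mem_nil, or_false, PySem.Set.mem_add, PySem.Set.mem_ofList]
  constructor
  · rintro ⟨hl, h1 | h2 | h3 | h4⟩
    · exact Or.inl (Or.inl (Or.inl h1))
    · exact Or.inl (Or.inl (Or.inr h2))
    · exact Or.inl (Or.inr h3)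
    · exact Or.inr h4
  · rintro (((h1 | h2) | h3) | h4)
    · subst h1; exact ⟨rfl, Or.inl rfl⟩
    · subst h2; exact ⟨l1.symm, Or.inr (Or.inl rfl)⟩
    · subst h3; exact ⟨l2.symm, Or.inr (Or.inr (Or.inl rfl))⟩
    · subst h4; exact ⟨l3.symm, Or.inr (Or.inr (Or.inr rfl))⟩


theorem pv_filter_nodup (s : List (List (Int × Int))) (hole : List (Int × Int)) (hnd : s.Nodup) :
    s.filter (fun f => f == hole) = if hole ∈ s then [hole] else [] := by
  induction s with
  | nil => simp
  | cons x t ih =>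
    rcases List.nodup_cons.mp hnd with ⟨hx, ht⟩
    by_cases hxh : x = hole
    · subst hxh
      simp [ih ht, if_neg hx]
    · simp only [List.filter_cons, beq_iff_eq, if_neg hxh, ih ht, List.mem_cons]
      simp [Ne.symm hxh]


theorem pv_index_step (l : List ((List (Int × Int)) × Nat))
    (d : PySem.Dict (List (Int × Int)) (List Nat)) (hole : List (Int × Int)) :
    (l.foldl (fun d pi => (pvForms pi.1).foldl (fun d f => d.modify f [] (· ++ [pi.2])) d) d).getD hole []
      = d.getD hole [] ++ (l.filter (fun pi => decide (hole ∈ pvForms pi.1))).map (·.2) := by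
  induction l generalizing d with
  | nil => simp
  | cons pi rest ih =>
    rw [List.foldl_cons, ih]
    have hinner : ((pvForms pi.1).foldl (fun d f => d.modify f [] (· ++ [pi.2])) d).getD hole []
        = d.getD hole [] ++ (if hole ∈ pvForms pi.1 then [pi.2] else []) := by
      have e := List.foldl_map (f := fun f => (f, pi.2))
        (g := fun (d : PySem.Dict (List (Int × Int)) (List Nat)) (p : (List (Int × Int)) × Nat) =>
          d.modify p.1 [] (· ++ [p.2])) (l := pvForms pi.1) (init := d)
      simp only at e
      rw [← e, PySem.Dict.getD_foldl_modify_append]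
      congr 1
      rw [List.filter_map]
      have : (fun (p : (List (Int × Int)) × Nat) => p.1 == hole) ∘ (fun f => (f, pi.2))
          = fun f => f == hole := rfl
      rw [this, pv_filter_nodup _ _ (pv_forms_nodup pi.1)]
      split_ifs <;> simp
    rw [hinner, List.filter_cons]
    by_cases hm : hole ∈ pvForms pi.1
    · simp [hm, List.append_assoc]
    · simp [hm]

theorem pv_index_getD (puzzles : List (List (Int × Int))) (hole : List (Int × Int)) :
    (pvIndex puzzles).getD hole [] =
      (puzzles.zipIdx.filter (fun pi => decide (hole ∈ pvForms pi.1))).map (·.2) := by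
  rw [pvIndex, pv_index_step]
  simp


theorem pv_scan_eq (hole : List (Int × Int)) (ps : List (List (Int × Int)))
    (hD : ∀ p ∈ ps, pvBnd 2147483648 p) :
    ∀ (k : Nat) (visited : List Bool) (count : Int),
      pvFindA hole k ps visited count =
        pvScan (((ps.zipIdx k).filter (fun pi => decide (hole ∈ pvForms pi.1))).map (·.2))
          visited count hole.length := by
  induction ps with
  | nil => intro k visited count; simp [pvFindA, pvScan]
  | cons p rest ih =>
    intro k visited count
    have hDp := hD p (by simp)
    have hDr : ∀ q ∈ rest, pvBnd 2147483648 q := fun q hq => hD q (List.mem_cons_of_mem _ hq)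
    rw [List.zipIdx_cons, List.filter_cons]
    by_cases hm : hole ∈ pvForms p
    · have hma := (pv_match_iff p hole hDp).mpr hm
      simp only [hm, decide_true, if_true, List.map_cons]
      rw [pvFindA]
      by_cases hv : visited.getD k false
      · rw [if_pos hv, ih hDr (k+1) visited count, pvScan, if_pos hv]
      · rw [if_neg hv, if_neg (by simp [hma.1]), if_pos hma.2, pvScan, if_neg hv]
    · simp only [hm, decide_false, Bool.false_eq_true, if_false]
      rw [pvFindA]
      by_cases hv : visited.getD k false
      · rw [if_pos hv]; exact ih hDr (k+1) visited count
      · rw [if_neg hv]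
        by_cases hl : p.length ≠ hole.length
        · rw [if_pos hl]; exact ih hDr (k+1) visited count
        · rw [if_neg hl]
          have : hole ∉ pvAffineRot p := fun hmem =>
            hm ((pv_match_iff p hole hDp).mp ⟨not_not.mp hl, hmem⟩)
          rw [if_neg this]; exact ih hDr (k+1) visited count


-- ===== VERDICT (by name: the statement is the Claim_ definition above) =====
theorem compare_puzzle_spec : Claim_equal_compare_puzzle := by
  intro puzzles holes hdom
  unfold Spec_compare_puzzle compare_puzzle compare_puzzle_alt
  have hD : ∀ p ∈ puzzles, pvBnd 2147483648 p := by
    intro p hp q hq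
    simp only [Dom_compare_puzzle, Bool.and_eq_true, List.all_eq_true, pvDomInt,
      decide_eq_true_eq] at hdom
    have := hdom.1 p hp q hq
    exact ⟨this.1.1, this.1.2, this.2.1, this.2.2⟩
  have hstep : (fun (st : List Bool × Int) hole => pvFindA hole 0 puzzles st.1 st.2)
      = (fun (st : List Bool × Int) hole => pvScan ((pvIndex puzzles).getD hole []) st.1 st.2 hole.length) := by
    funext st hole
    rw [pv_index_getD, pv_scan_eq hole puzzles hD 0 st.1 st.2]
  rw [hstep]
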